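-- pv_equiv track=rewrite | github.com/sandyhs1/vedic-compatibility-api | vedic_compatibility_api.py | calculate_tara
-- ===== SOURCE A (Python) =====
-- NAKSHATRAS = [
--     {"name": "Ashwini", "lord": "Ketu", "start": 0, "end": 13.333},
--     {"name": "Bharani", "lord": "Venus", "start": 13.333, "end": 26.667},
--     {"name": "Krittika", "lord": "Sun", "start": 26.667, "end": 40},
--     {"name": "Rohini", "lord": "Moon", "start": 40, "end": 53.333},
--     {"name": "Mrigashira", "lord": "Mars", "start": 53.333, "end": 66.667},
--     {"name": "Ardra", "lord": "Rahu", "start": 66.667, "end": 80},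
--     {"name": "Punarvasu", "lord": "Jupiter", "start": 80, "end": 93.333},
--     {"name": "Pushya", "lord": "Saturn", "start": 93.333, "end": 106.667},
--     {"name": "Ashlesha", "lord": "Mercury", "start": 106.667, "end": 120},
--     {"name": "Magha", "lord": "Ketu", "start": 120, "end": 133.333},
--     {"name": "Purva Phalguni", "lord": "Venus", "start": 133.333, "end": 146.667},
--     {"name": "Uttara Phalguni", "lord": "Sun", "start": 146.667, "end": 160},
--     {"name": "Hasta", "lord": "Moon", "start": 160, "end": 173.333},
--     {"name": "Chitra", "lord": "Mars", "start": 173.333, "end": 186.667},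
--     {"name": "Swati", "lord": "Rahu", "start": 186.667, "end": 200},
--     {"name": "Vishakha", "lord": "Jupiter", "start": 200, "end": 213.333},
--     {"name": "Anuradha", "lord": "Saturn", "start": 213.333, "end": 226.667},
--     {"name": "Jyeshtha", "lord": "Mercury", "start": 226.667, "end": 240},
--     {"name": "Mula", "lord": "Ketu", "start": 240, "end": 253.333},
--     {"name": "Purva Ashadha", "lord": "Venus", "start": 253.333, "end": 266.667},
--     {"name": "Uttara Ashadha", "lord": "Sun", "start": 266.667, "end": 280},
--     {"name": "Shravana", "lord": "Moon", "start": 280, "end": 293.333},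
--     {"name": "Dhanishta", "lord": "Mars", "start": 293.333, "end": 306.667},
--     {"name": "Shatabhisha", "lord": "Rahu", "start": 306.667, "end": 320},
--     {"name": "Purva Bhadrapada", "lord": "Jupiter", "start": 320, "end": 333.333},
--     {"name": "Uttara Bhadrapada", "lord": "Saturn", "start": 333.333, "end": 346.667},
--     {"name": "Revati", "lord": "Mercury", "start": 346.667, "end": 360}
-- ]
--
-- def calculate_tara(nakshatra1, nakshatra2):
--     """Calculate Tara compatibility (simplified)"""
--     # Get nakshatra indices
--     idx1 = next((i for i, nak in enumerate(NAKSHATRAS) if nak["name"] == nakshatra1), 0)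
--     idx2 = next((i for i, nak in enumerate(NAKSHATRAS) if nak["name"] == nakshatra2), 0)
--
--     # Calculate distance
--     distance = abs(idx1 - idx2) % 27
--
--     # Tara scoring
--     if distance in [1, 2, 3, 4, 5, 7, 8, 9, 10, 11, 13, 14, 15, 16, 17, 19, 20, 21, 22, 23, 25, 26]:
--         return 3  # Excellent
--     elif distance in [6, 12, 18, 24]:
--         return 1  # Poor
--     else:
--         return 2  # Good
-- ===== SOURCE B (Python) =====
-- # B: single forward scan of the zodiac ring counting the gap between the two stars
-- # (no index arithmetic), then a pattern-generated score table instead of membership lists.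
-- RING = [
--     "Ashwini", "Bharani", "Krittika", "Rohini", "Mrigashira", "Ardra", "Punarvasu",
--     "Pushya", "Ashlesha", "Magha", "Purva Phalguni", "Uttara Phalguni", "Hasta",
--     "Chitra", "Swati", "Vishakha", "Anuradha", "Jyeshtha", "Mula", "Purva Ashadha",
--     "Uttara Ashadha", "Shravana", "Dhanishta", "Shatabhisha", "Purva Bhadrapada",
--     "Uttara Bhadrapada", "Revati",
-- ]
--
-- # score by separation 0..26: 0 -> Good(2), then four blocks of five Excellent(3)
-- # ending in a Poor(1), then two Excellent(3)
-- _SCORES = [2] + ([3] * 5 + [1]) * 4 + [3] * 2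
--
--
-- def calculate_tara(nakshatra1, nakshatra2):
--     k1 = nakshatra1 if nakshatra1 in RING else RING[0]
--     k2 = nakshatra2 if nakshatra2 in RING else RING[0]
--     gap = 0
--     steps = 0
--     opened = False
--     for name in RING:
--         if opened:
--             steps += 1
--         if name == k1 or name == k2:
--             if opened or k1 == k2:
--                 gap = steps
--                 break
--             opened = True
--     return _SCORES[gap]
-- ===== Notes on version B (the rewrite author's own statement) =====
-- stated objective: alternative
-- what changed: Replaces the two enumerate-scans, abs-difference-mod-27 and membership-list branches with one forward scan of the ring that counts the gap between the first and second matching star (no index arithmetic) and a pattern-generated score table indexed by that gap.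
import Mathlib
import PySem

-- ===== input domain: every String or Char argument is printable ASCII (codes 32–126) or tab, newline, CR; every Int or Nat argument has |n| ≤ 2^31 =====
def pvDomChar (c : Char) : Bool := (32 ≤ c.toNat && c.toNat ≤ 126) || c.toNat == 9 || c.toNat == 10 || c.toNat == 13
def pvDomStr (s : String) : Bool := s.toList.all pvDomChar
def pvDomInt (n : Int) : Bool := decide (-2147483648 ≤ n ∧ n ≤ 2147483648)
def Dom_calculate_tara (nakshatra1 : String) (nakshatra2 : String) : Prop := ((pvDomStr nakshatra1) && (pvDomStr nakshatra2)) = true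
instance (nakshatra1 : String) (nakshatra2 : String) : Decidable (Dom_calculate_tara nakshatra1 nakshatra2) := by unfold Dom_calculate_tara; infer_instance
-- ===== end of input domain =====

-- B replaces A's two index lookups + abs-difference-mod-27 + membership-list branches by a
-- single forward scan counting the gap between the two stars and a pattern-built score table
-- (alternative decomposition, same cost; return value only).

-- ===== PORT A =====
-- NAKSHATRAS: only the "name" field is read by calculate_tara; the unused float fields are not ported.
def pvNakNames : List String :=
  ["Ashwini", "Bharani", "Krittika", "Rohini", "Mrigashira", "Ardra", "Punarvasu",
   "Pushya", "Ashlesha", "Magha", "Purva Phalguni", "Uttara Phalguni", "Hasta",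
   "Chitra", "Swati", "Vishakha", "Anuradha", "Jyeshtha", "Mula", "Purva Ashadha",
   "Uttara Ashadha", "Shravana", "Dhanishta", "Shatabhisha", "Purva Bhadrapada",
   "Uttara Bhadrapada", "Revati"]

-- next((i for i, nak in enumerate(NAKSHATRAS) if nak["name"] == s), 0)
def pvIdxA (s : String) : Int :=
  (((PySem.List.enumerate pvNakNames).find? (fun p => p.2 == s)).map (fun p => p.1)).getD 0

def calculate_tara (nakshatra1 : String) (nakshatra2 : String) : Int :=
  let idx1 := pvIdxA nakshatra1
  let idx2 := pvIdxA nakshatra2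
  let distance := PySem.Int.mod (|idx1 - idx2|) 27
  if ([1, 2, 3, 4, 5, 7, 8, 9, 10, 11, 13, 14, 15, 16, 17, 19, 20, 21, 22, 23, 25, 26] : List Int).contains distance then 3
  else if ([6, 12, 18, 24] : List Int).contains distance then 1
  else 2

-- ===== PORT B =====
def pvRing : List String :=
  ["Ashwini", "Bharani", "Krittika", "Rohini", "Mrigashira", "Ardra", "Punarvasu",
   "Pushya", "Ashlesha", "Magha", "Purva Phalguni", "Uttara Phalguni", "Hasta",
   "Chitra", "Swati", "Vishakha", "Anuradha", "Jyeshtha", "Mula", "Purva Ashadha",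
   "Uttara Ashadha", "Shravana", "Dhanishta", "Shatabhisha", "Purva Bhadrapada",
   "Uttara Bhadrapada", "Revati"]

-- _SCORES = [2] + ([3]*5 + [1])*4 + [3]*2
def pvScores : List Int :=
  ([2] : List Int) ++ (List.replicate 4 (List.replicate 5 (3 : Int) ++ [1])).flatten ++ List.replicate 2 3

-- k = s if s in RING else RING[0]   (RING is nonempty, so RING[0] = headD "")
def pvKey (s : String) : String := if pvRing.contains s then s else pvRing.headD ""

-- the for-loop with the opened/steps accumulators and break, as structural recursion
def pvScan (k1 k2 : String) : List String → Bool → Int → Int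
  | [], _, _ => 0
  | name :: rest, opened, steps =>
      let steps := if opened then steps + 1 else steps
      if name == k1 || name == k2 then
        if opened || k1 == k2 then steps
        else pvScan k1 k2 rest true steps
      else pvScan k1 k2 rest opened steps

def calculate_tara_alt (nakshatra1 : String) (nakshatra2 : String) : Int :=
  let k1 := pvKey nakshatra1
  let k2 := pvKey nakshatra2
  let gap := pvScan k1 k2 pvRing false 0
  -- _SCORES[gap]: gap is always a valid index here, so the default is never used
  (PySem.List.pyGet? pvScores gap).getD 0

-- ===== PRECONDITION & SPEC =====
def Spec_calculate_tara (nakshatra1 : String) (nakshatra2 : String) (out : Int) : Prop := out = calculate_tara_alt nakshatra1 nakshatra2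
instance (nakshatra1 : String) (nakshatra2 : String) (out : Int) : Decidable (Spec_calculate_tara nakshatra1 nakshatra2 out) := by unfold Spec_calculate_tara; infer_instance

-- ===== CLAIM (what is proved, stated in full; the proofs are below) =====
def Claim_equal_calculate_tara : Prop := ∀ (nakshatra1 : String) (nakshatra2 : String), Dom_calculate_tara nakshatra1 nakshatra2 → Spec_calculate_tara nakshatra1 nakshatra2 (calculate_tara nakshatra1 nakshatra2)

-- ===== LEMMAS AND PROOFS =====
theorem pvRing_eq_names : pvRing = pvNakNames := rfl

theorem pvKey_eq_of_mem (s : String) (h : s ∈ pvRing) : pvKey s = s := by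
  simp [pvKey, h]

theorem pvKey_eq_of_not_mem (s : String) (h : s ∉ pvRing) : pvKey s = "Ashwini" := by
  simp [pvKey, h]
  decide

-- A's index lookup is unchanged by B's name normalisation (unknown names behave like index 0 = "Ashwini").
theorem pvIdxA_key (s : String) : pvIdxA s = pvIdxA (pvKey s) := by
  by_cases h : s ∈ pvRing
  · rw [pvKey_eq_of_mem s h]
  · rw [pvKey_eq_of_not_mem s h]
    have hfind : (PySem.List.enumerate pvNakNames).find? (fun p => p.2 == s) = none := by
      rw [List.find?_eq_none]
      intro p hp
      obtain ⟨k, hk, rfl⟩ := (PySem.List.mem_enumerate_iff _ _ _).mp hp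
      simp only [beq_iff_eq]
      intro heq
      exact h (pvRing_eq_names ▸ (heq ▸ List.getElem_mem hk))
    have h0 : pvIdxA s = 0 := by unfold pvIdxA; rw [hfind]; rfl
    rw [h0]
    decide

-- A depends on its arguments only through pvIdxA, hence only through pvKey.
theorem pvA_key (a b : String) : calculate_tara a b = calculate_tara (pvKey a) (pvKey b) := by
  unfold calculate_tara
  rw [← pvIdxA_key a, ← pvIdxA_key b]

theorem pvKey_mem (s : String) : pvKey s ∈ pvRing := by
  by_cases h : s ∈ pvRing
  · rw [pvKey_eq_of_mem s h]; exact h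
  · rw [pvKey_eq_of_not_mem s h]; decide

-- On ring members the two programs agree (729 concrete cases).
theorem pvMain : ∀ a ∈ pvRing, ∀ b ∈ pvRing, calculate_tara a b = calculate_tara_alt a b := by
  decide

-- B's normalisation is idempotent, so B too depends only on the keys.
theorem pvAlt_key (a b : String) : calculate_tara_alt a b = calculate_tara_alt (pvKey a) (pvKey b) := by
  unfold calculate_tara_alt
  rw [pvKey_eq_of_mem (pvKey a) (pvKey_mem a), pvKey_eq_of_mem (pvKey b) (pvKey_mem b)]

-- ===== VERDICT (by name: the statement is the Claim_ definition above) =====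
theorem calculate_tara_spec : Claim_equal_calculate_tara := by
  intro n1 n2 _
  unfold Spec_calculate_tara
  rw [pvA_key, pvAlt_key]
  exact pvMain _ (pvKey_mem n1) _ (pvKey_mem n2)
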